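-- pv_equiv track=rewrite | github.com/keras-team/keras | Lib/site-packages/scipy/special/_basic.py | _range_prod
-- ===== SOURCE A (Python) =====
-- import math
--
-- def _range_prod(lo, hi, k=1):
--     """
--     Product of a range of numbers spaced k apart (from hi).
--
--     For k=1, this returns the product of
--     lo * (lo+1) * (lo+2) * ... * (hi-2) * (hi-1) * hi
--     = hi! / (lo-1)!
--
--     For k>1, it correspond to taking only every k'th number when
--     counting down from hi - e.g. 18!!!! = _range_prod(1, 18, 4).
--
--     Breaks into smaller products first for speed:
--     _range_prod(2, 9) = ((2*3)*(4*5))*((6*7)*(8*9))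
--     """
--     if lo == 1 and k == 1:
--         return math.factorial(hi)
--
--     if lo + k < hi:
--         mid = (hi + lo) // 2
--         if k > 1:
--             # make sure mid is a multiple of k away from hi
--             mid = mid - ((mid - hi) % k)
--         return _range_prod(lo, mid, k) * _range_prod(mid + k, hi, k)
--     elif lo + k == hi:
--         return lo * hi
--     else:
--         return hi
-- ===== SOURCE B (Python) =====
-- import math
--
-- def _range_prod(lo, hi, k=1):
--     if lo == 1 and k == 1:
--         return math.factorial(hi)
--     result = hi
--     n = hi - k
--     while n >= lo:
--         result *= n
--         n -= k
--     return result
-- ===== Notes on version B (the rewrite author's own statement) =====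
-- stated objective: simpler
-- what changed: Replaced the recursive divide-and-conquer range splitting (midpoint aligned to a multiple of k from hi) by a single countdown loop that starts the accumulator at hi and multiplies in hi-k, hi-2k, ... while >= lo; the math.factorial fast path is kept.
-- outside the precondition, e.g. on _range_prod(2, 1, -1): A returns 2, B does not finish within the time limit; on _range_prod(1, -1, 1): A raises ValueError, B raises ValueError
import Mathlib
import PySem

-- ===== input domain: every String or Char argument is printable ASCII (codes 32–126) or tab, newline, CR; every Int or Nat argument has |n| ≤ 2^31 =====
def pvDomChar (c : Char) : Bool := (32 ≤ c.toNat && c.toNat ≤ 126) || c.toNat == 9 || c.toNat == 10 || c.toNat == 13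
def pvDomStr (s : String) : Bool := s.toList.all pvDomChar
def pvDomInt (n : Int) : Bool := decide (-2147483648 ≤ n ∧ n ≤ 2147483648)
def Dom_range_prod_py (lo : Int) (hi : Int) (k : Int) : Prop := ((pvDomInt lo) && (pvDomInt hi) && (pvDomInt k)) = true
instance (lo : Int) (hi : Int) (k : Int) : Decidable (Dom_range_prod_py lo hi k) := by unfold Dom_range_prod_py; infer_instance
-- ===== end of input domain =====

-- B replaces A's recursive divide-and-conquer by a single countdown loop (accumulator starts at hi); simpler, same multiplication count.

-- math.factorial(n); exact for 0 ≤ n (Python raises ValueError for n < 0 — excluded by Pre_)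
def pyFactorial (n : Int) : Int := (Nat.factorial n.toNat : Int)

-- ===== PORT A =====
-- fuel makes the recursion total; (hi-lo).toNat+1 is enough for every input admitted by Pre_
def rangeProdAux : Nat → Int → Int → Int → Int
  | 0, _, hi, _ => hi
  | f+1, lo, hi, k =>
    if lo = 1 ∧ k = 1 then pyFactorial hi
    else if lo + k < hi then
      let mid0 := PySem.Int.floordiv (hi + lo) 2
      let mid := if 1 < k then mid0 - PySem.Int.mod (mid0 - hi) k else mid0
      rangeProdAux f lo mid k * rangeProdAux f (mid + k) hi k
    else if lo + k = hi then lo * hi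
    else hi

def range_prod_py (lo : Int) (hi : Int) (k : Int) : Int :=
  rangeProdAux ((hi - lo).toNat + 1) lo hi k

-- ===== PORT B =====
-- the while loop of Source B; fuel makes it total, (hi-lo).toNat+1 iterations suffice for k ≥ 1
def altLoop : Nat → Int → Int → Int → Int → Int
  | 0, _, _, _, result => result
  | f+1, lo, k, n, result => if lo ≤ n then altLoop f lo k (n - k) (result * n) else result

def range_prod_py_alt (lo : Int) (hi : Int) (k : Int) : Int :=
  if lo = 1 ∧ k = 1 then pyFactorial hi
  else altLoop ((hi - lo).toNat + 1) lo k (hi - k) hi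

-- ===== PRECONDITION & SPEC =====
-- Pre_ excludes k ≤ 0 with lo + k ≤ hi (there A's recursion either never terminates, or — when
-- lo + k = hi — returns lo*hi while B's countdown loop does not terminate), and lo = 1 ∧ k = 1
-- with hi < 0, where math.factorial raises ValueError in both programs.
def Pre_range_prod_py (lo : Int) (hi : Int) (k : Int) : Prop :=
  (1 ≤ k ∨ hi < lo + k) ∧ (lo = 1 ∧ k = 1 → 0 ≤ hi)
instance (lo : Int) (hi : Int) (k : Int) : Decidable (Pre_range_prod_py lo hi k) := by
  unfold Pre_range_prod_py; infer_instance

def pvWitness_range_prod_py : Int × Int × Int := (3, 12, 2)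

def Spec_range_prod_py (lo : Int) (hi : Int) (k : Int) (out : Int) : Prop := out = range_prod_py_alt lo hi k
instance (lo : Int) (hi : Int) (k : Int) (out : Int) : Decidable (Spec_range_prod_py lo hi k out) := by unfold Spec_range_prod_py; infer_instance

-- ===== CLAIM (what is proved, stated in full; the proofs are below) =====
def Claim_equal_range_prod_py : Prop := ∀ (lo : Int) (hi : Int) (k : Int), Dom_range_prod_py lo hi k → Pre_range_prod_py lo hi k → Spec_range_prod_py lo hi k (range_prod_py lo hi k)

-- ===== LEMMAS AND PROOFS =====

-- the canonical value of B's loop: product of n, n-k, n-2k, … while ≥ lo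
def chainProd (lo k n : Int) : Int := altLoop (n - lo + 1).toNat lo k n 1

theorem altLoop_acc (f : Nat) : ∀ (lo k n a : Int),
    altLoop f lo k n a = a * altLoop f lo k n 1 := by
  induction f with
  | zero => intro lo k n a; simp [altLoop]
  | succ f ih =>
    intro lo k n a
    simp only [altLoop]
    split
    · rw [ih lo k (n - k) (a * n), ih lo k (n - k) (1 * n)]
      ring
    · ring

theorem altLoop_fuel : ∀ (f g : Nat) (lo k n r : Int), 1 ≤ k →
    (n - lo + 1).toNat ≤ f → (n - lo + 1).toNat ≤ g →
    altLoop f lo k n r = altLoop g lo k n r := by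
  intro f
  induction f with
  | zero =>
    intro g lo k n r hk hf hg
    have hn : n < lo := by omega
    cases g with
    | zero => rfl
    | succ g => simp [altLoop, not_le.mpr hn]
  | succ f ih =>
    intro g lo k n r hk hf hg
    by_cases hn : lo ≤ n
    · have hg1 : 1 ≤ (n - lo + 1).toNat := by omega
      cases g with
      | zero => omega
      | succ g =>
        simp only [altLoop, if_pos hn]
        exact ih g lo k (n - k) (r * n) hk (by omega) (by omega)
    · cases g with
      | zero => simp [altLoop, hn]
      | succ g => simp [altLoop, hn]

theorem chainProd_unfold (lo k n : Int) (hk : 1 ≤ k) :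
    chainProd lo k n = if lo ≤ n then n * chainProd lo k (n - k) else 1 := by
  unfold chainProd
  split
  · next hn =>
    obtain ⟨m, hm⟩ : ∃ m, (n - lo + 1).toNat = m + 1 := ⟨(n - lo).toNat, by omega⟩
    rw [hm]
    simp only [altLoop, if_pos hn]
    rw [altLoop_acc, one_mul,
        altLoop_fuel m ((n - k - lo + 1).toNat) lo k (n - k) 1 hk (by omega) (le_refl _)]
  · next hn =>
    have : (n - lo + 1).toNat = 0 := by omega
    rw [this]; rfl

theorem chainProd_split (lo mid k : Int) (hk : 1 ≤ k) (hlom : lo ≤ mid) :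
    ∀ t : Nat, chainProd lo k (mid + t * k) =
      chainProd (mid + k) k (mid + t * k) * (mid * chainProd lo k (mid - k)) := by
  intro t
  induction t with
  | zero =>
    simp only [Nat.cast_zero, zero_mul, add_zero]
    rw [chainProd_unfold lo k mid hk, if_pos hlom,
        chainProd_unfold (mid + k) k mid hk, if_neg (by omega)]
    ring
  | succ t ih =>
    have htk : 0 ≤ (t : Int) * k := mul_nonneg (Int.natCast_nonneg t) (by omega)
    have hc : ((t + 1 : Nat) : Int) = (t : Int) + 1 := by push_cast; ring
    have hn : mid + ((t : Int) + 1) * k - k = mid + t * k := by ring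
    rw [hc, chainProd_unfold lo k _ hk, if_pos (by nlinarith : lo ≤ mid + ((t : Int) + 1) * k),
        hn, ih, chainProd_unfold (mid + k) k (mid + ((t : Int) + 1) * k) hk,
        if_pos (by nlinarith : mid + k ≤ mid + ((t : Int) + 1) * k), hn]
    ring

theorem chainProd_factorial : ∀ m : Nat, chainProd 1 1 (m : Int) = (Nat.factorial m : Int) := by
  intro m
  induction m with
  | zero => rw [Nat.cast_zero, chainProd_unfold 1 1 0 (le_refl 1), if_neg (by omega)]; rfl
  | succ m ih =>
    have hc : ((m + 1 : Nat) : Int) = (m : Int) + 1 := by push_cast; ring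
    rw [hc, chainProd_unfold 1 1 _ (le_refl 1), if_pos (by omega)]
    have h1 : (m : Int) + 1 - 1 = (m : Int) := by ring
    rw [h1, ih, Nat.factorial_succ]
    push_cast; ring

-- B's value as hi times the chain product (needs hi ≥ 1 when the factorial guard fires)
theorem alt_eq_chain (lo hi k : Int) (hk : 1 ≤ k) (hg : lo = 1 ∧ k = 1 → 1 ≤ hi) :
    range_prod_py_alt lo hi k = hi * chainProd lo k (hi - k) := by
  unfold range_prod_py_alt
  split
  · next h =>
    obtain ⟨h1, h2⟩ := h
    have hhi : 1 ≤ hi := hg ⟨h1, h2⟩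
    subst h1 h2
    obtain ⟨m, hm⟩ : ∃ m : Nat, hi = (m : Int) + 1 := ⟨(hi - 1).toNat, by omega⟩
    have h1 : hi - 1 = (m : Int) := by omega
    rw [h1, chainProd_factorial m, hm]
    show ((((m : Int) + 1).toNat).factorial : Int) = ((m : Int) + 1) * (m.factorial : Int)
    have : ((m : Int) + 1).toNat = m + 1 := by omega
    rw [this, Nat.factorial_succ]
    push_cast; ring
  · rw [altLoop_acc, altLoop_fuel ((hi - lo).toNat + 1) ((hi - k - lo + 1).toNat) lo k (hi - k) 1 hk
        (by omega) (le_refl _)]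
    rfl

theorem main_eq : ∀ (f : Nat) (lo hi k : Int), 1 ≤ k → (lo = 1 ∧ k = 1 → 0 ≤ hi) →
    (hi - lo).toNat < f → rangeProdAux f lo hi k = range_prod_py_alt lo hi k := by
  intro f
  induction f with
  | zero => intro lo hi k _ _ hf; omega
  | succ f ih =>
    intro lo hi k hk hg hf
    simp only [rangeProdAux]
    by_cases h1 : lo = 1 ∧ k = 1
    · rw [if_pos h1, range_prod_py_alt, if_pos h1]
    rw [if_neg h1]
    by_cases h2 : lo + k < hi
    · rw [if_pos h2]
      have hlh : lo < hi := by omega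
      have hchar := (PySem.Int.floordiv_eq_iff_of_pos (a := hi + lo) (b := 2)
        (q := PySem.Int.floordiv (hi + lo) 2) (by omega)).mp rfl
      set mid0 := PySem.Int.floordiv (hi + lo) 2 with hmid0
      have hm0 : lo ≤ mid0 ∧ mid0 ≤ hi := by omega
      have hm0lt : mid0 < hi := by omega
      -- the midpoint actually used, and its chain facts
      set mid : Int := if 1 < k then mid0 - PySem.Int.mod (mid0 - hi) k else mid0 with hmid
      obtain ⟨t, ht1, ht2, hlomid⟩ : ∃ t : Int, 1 ≤ t ∧ hi = mid + t * k ∧ lo ≤ mid := by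
        by_cases hk1 : 1 < k
        · have hr0 : 0 ≤ PySem.Int.mod (mid0 - hi) k := PySem.Int.mod_nonneg _ (by omega)
          have hrk : PySem.Int.mod (mid0 - hi) k < k := PySem.Int.mod_lt _ (by omega)
          have hdiv := PySem.Int.floordiv_mul_add_mod (mid0 - hi) k
          set d := PySem.Int.floordiv (mid0 - hi) k with hd
          set r := PySem.Int.mod (mid0 - hi) k with hr
          have hmid' : mid = hi + d * k := by rw [hmid, if_pos hk1]; omega
          refine ⟨-d, ?_, by rw [hmid']; ring, ?_⟩
          · -- mid < hi forces t*k > 0 hence t ≥ 1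
            have hmlt : mid < hi := by rw [hmid, if_pos hk1]; omega
            by_contra hcon
            have hd0 : 0 ≤ d := by omega
            nlinarith [mul_nonneg hd0 (by omega : (0:Int) ≤ k)]
          · -- lo ≤ mid, else a gap of width ≥ 2k would fit below the midpoint
            by_contra hcon
            rw [not_le] at hcon
            have hmlt : mid < hi := by rw [hmid, if_pos hk1]; omega
            have htpos : 1 ≤ -d := by
              by_contra hcon2
              have hd0 : 0 ≤ d := by omega
              nlinarith [mul_nonneg hd0 (by omega : (0:Int) ≤ k)]
            set t := -d with htdef
            have ht2 : hi = mid + t * k := by rw [hmid']; ring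
            -- t = 1 would give mid = hi - k > lo, contradiction
            have htge2 : 2 ≤ t := by
              by_contra hcon2
              have hteq : t = 1 := by omega
              have ht2' := ht2
              rw [hteq, one_mul] at ht2'
              omega
            -- mid + k > mid0 (r < k), and 2*mid0 ≥ hi + lo - 1
            have hgap : mid0 < mid + k := by rw [hmid, if_pos hk1]; omega
            have hlow : hi + lo ≤ 2 * mid0 + 1 := by omega
            -- hi - lo < t*k (mid < lo) and hi - lo ≥ 2(t-1)k - 1 ⇒ (t-2)k ≤ -1, impossible
            nlinarith [mul_nonneg (by omega : (0:Int) ≤ t - 2) (by omega : (0:Int) ≤ k)]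
        · have hk1' : k = 1 := by omega
          have hmide : mid = mid0 := by rw [hmid, if_neg hk1]
          exact ⟨hi - mid0, by omega, by rw [hmide, hk1']; ring, by rw [hmide]; exact hm0.1⟩
      have hmidhi : mid + k ≤ hi := by
        nlinarith [mul_nonneg (by omega : (0:Int) ≤ t - 1) (by omega : (0:Int) ≤ k)]
      have hmidlt : mid < hi := by omega
      -- recursive calls via the induction hypothesis
      rw [ih lo mid k hk (fun h => absurd h h1) (by omega),
          ih (mid + k) hi k hk (fun h => by omega) (by omega)]
      rw [alt_eq_chain lo mid k hk (fun h => absurd h h1),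
          alt_eq_chain (mid + k) hi k hk (fun h => by omega),
          alt_eq_chain lo hi k hk (fun h => absurd h h1)]
      obtain ⟨s, hs⟩ : ∃ s : Nat, (s : Int) = t - 1 := ⟨(t - 1).toNat, by omega⟩
      have hsplit := chainProd_split lo mid k hk hlomid s
      have hrw : mid + (s : Int) * k = hi - k := by rw [hs]; linear_combination -ht2
      rw [hrw] at hsplit
      rw [hsplit]
      ring
    rw [if_neg h2]
    by_cases h3 : lo + k = hi
    · rw [if_pos h3, alt_eq_chain lo hi k hk (fun h => absurd h h1)]
      have : hi - k = lo := by omega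
      rw [this, chainProd_unfold lo k lo hk, if_pos (le_refl lo),
          chainProd_unfold lo k (lo - k) hk, if_neg (by omega)]
      ring
    · rw [if_neg h3, alt_eq_chain lo hi k hk (fun h => absurd h h1),
          chainProd_unfold lo k (hi - k) hk, if_neg (by omega)]
      ring

-- ===== VERDICT (by name: the statement is the Claim_ definition above) =====
theorem range_prod_py_spec : Claim_equal_range_prod_py := by
  intro lo hi k _ hpre
  unfold Spec_range_prod_py range_prod_py
  obtain ⟨hk1, hg⟩ := hpre
  by_cases hk : 1 ≤ k
  · exact main_eq ((hi - lo).toNat + 1) lo hi k hk hg (Nat.lt_succ_self _)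
  · -- k ≤ 0 and hi < lo + k: both programs return hi without recursing / looping
    have hdeg : hi < lo + k := by tauto
    have hg' : ¬(lo = 1 ∧ k = 1) := by rintro ⟨_, h⟩; omega
    simp only [rangeProdAux, range_prod_py_alt, altLoop]
    rw [if_neg hg', if_neg (by omega), if_neg (by omega), if_neg hg',
        if_neg (by omega : ¬ lo ≤ hi - k)]
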